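-- pv_equiv track=rewrite | github.com/Dou-Meishi/org-blog | 2022-07-17-PokerProbability/bombs.py | count_bombs
-- ===== SOURCE A (Python) =====
-- def count_bombs(alist):
--     out = 0
--     if 0 in alist and alist.count(0) == 2:
--         out += 1
--     for i in range(1, 14):
--         if i in alist and alist.count(i) == 4:
--             out += 1
--     return out
-- ===== SOURCE B (Python) =====
-- def count_bombs(alist):
--     s = sorted(alist)
--     out = 0
--     i = 0
--     m = len(s)
--     while i < m:
--         j = i
--         while j < m and s[j] == s[i]:
--             j += 1
--         n = j - i
--         v = s[i]
--         if (v == 0 and n == 2) or (1 <= v <= 13 and n == 4):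
--             out += 1
--         i = j
--     return out
-- ===== Notes on version B (the rewrite author's own statement) =====
-- stated objective: alternative
-- what changed: B sorts the hand once and scans it in a single pass over maximal runs of equal values, counting a run as a bomb when it is a pair of jokers (value 0) or four of an in-range rank 1..13, instead of A's fixed loop over the 14 ranks each with a membership test plus a full count scan.
import Mathlib
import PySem

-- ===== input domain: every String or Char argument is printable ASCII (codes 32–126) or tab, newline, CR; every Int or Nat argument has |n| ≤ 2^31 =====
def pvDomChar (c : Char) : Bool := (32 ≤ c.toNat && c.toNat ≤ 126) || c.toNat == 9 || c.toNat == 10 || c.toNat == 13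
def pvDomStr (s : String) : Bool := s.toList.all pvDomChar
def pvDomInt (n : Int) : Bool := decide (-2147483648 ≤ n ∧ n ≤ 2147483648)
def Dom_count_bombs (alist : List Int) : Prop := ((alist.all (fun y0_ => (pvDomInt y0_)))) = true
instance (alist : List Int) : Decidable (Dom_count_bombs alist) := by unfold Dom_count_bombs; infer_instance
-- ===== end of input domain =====

-- B sorts the hand once and scans it in a single pass over maximal runs of equal values,
-- instead of A's fixed loop over the 14 ranks each with a membership test plus a full count scan (alternative).


-- ===== PORT A =====
def count_bombs (alist : List Int) : Int :=
  let out : Int := 0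
  let out := if 0 ∈ alist ∧ alist.count 0 = 2 then out + 1 else out
  (PySem.List.pyRange 1 14 1).foldl
    (fun out i => if i ∈ alist ∧ alist.count i = 4 then out + 1 else out) out

-- ===== PORT B =====
-- the outer while loop of Source B: each step consumes one maximal run (the inner
-- `while s[j] == s[i]` scan is the takeWhile/dropWhile split), n = run length
def bombRuns : List Int → Int
  | [] => 0
  | x :: xs =>
    (if (x = 0 ∧ (1 + ((xs.takeWhile (fun y => y == x)).length : Int)) = 2)
        ∨ (1 ≤ x ∧ x ≤ 13 ∧ (1 + ((xs.takeWhile (fun y => y == x)).length : Int)) = 4)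
     then 1 else 0) + bombRuns (xs.dropWhile (fun y => y == x))
termination_by l => l.length
decreasing_by
  exact Nat.lt_succ_of_le (List.length_dropWhile_le _ _)

def count_bombs_alt (alist : List Int) : Int :=
  bombRuns (PySem.List.sorted alist (fun x => x) false)

-- ===== PRECONDITION & SPEC =====
def Spec_count_bombs (alist : List Int) (out : Int) : Prop := out = count_bombs_alt alist
instance (alist : List Int) (out : Int) : Decidable (Spec_count_bombs alist out) := by unfold Spec_count_bombs; infer_instance

-- ===== CLAIM (what is proved, stated in full; the proofs are below) =====
def Claim_equal_count_bombs : Prop := ∀ (alist : List Int), Dom_count_bombs alist → Spec_count_bombs alist (count_bombs alist)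

-- ===== LEMMAS AND PROOFS =====

-- the common value: how many distinct values of l qualify as a bomb
abbrev Qb (l : List Int) (v : Int) : Prop :=
  (v = 0 ∧ (l.count v : Int) = 2) ∨ (1 ≤ v ∧ v ≤ 13 ∧ (l.count v : Int) = 4)

def distinctBombs (l : List Int) : Int :=
  (l.dedup.countP (fun v => decide (Qb l v)) : Int)

-- a counting foldl is countP
theorem foldl_ite_add_one_eq_countP {α : Type} (p : α → Prop) [DecidablePred p]
    (l : List α) (n : Int) :
    l.foldl (fun out i => if p i then out + 1 else out) n
      = n + (l.countP (fun i => decide (p i)) : Int) := by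
  induction l generalizing n with
  | nil => simp
  | cons x xs ih =>
    simp only [List.foldl_cons, List.countP_cons, ih]
    by_cases h : p x
    · simp [h]
      omega
    · simp [h]

-- A equals the distinct-value count
theorem A_eq_distinctBombs (alist : List Int) :
    count_bombs alist = distinctBombs alist := by
  unfold count_bombs distinctBombs
  dsimp only
  rw [foldl_ite_add_one_eq_countP (fun i => i ∈ alist ∧ alist.count i = 4)]
  have hperm :
      (alist.dedup.filter (fun v : Int => decide (Qb alist v))).Perm
      (((0 : Int) :: PySem.List.pyRange 1 14 1).filter
        (fun i : Int => decide (i ∈ alist ∧ alist.count i = (if i = 0 then 2 else 4)))) := by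
    rw [List.perm_ext_iff_of_nodup]
    · intro x
      simp only [List.mem_filter, List.mem_dedup, List.mem_cons,
        PySem.List.mem_pyRange_one, decide_eq_true_eq, Qb]
      constructor
      · rintro ⟨hx, ⟨h0, hc⟩ | ⟨h1, h13, hc⟩⟩
        · subst h0
          exact ⟨Or.inl rfl, hx, by simpa using (by exact_mod_cast hc : List.count (0:Int) alist = 2)⟩
        · have hne : x ≠ 0 := by omega
          refine ⟨Or.inr ⟨by omega, by omega⟩, hx, ?_⟩
          rw [if_neg hne]
          exact_mod_cast hc
      · rintro ⟨hr, hx, hc⟩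
        refine ⟨hx, ?_⟩
        by_cases hne : x = 0
        · subst hne
          rw [if_pos rfl] at hc
          exact Or.inl ⟨rfl, by exact_mod_cast hc⟩
        · have hb : 1 ≤ x ∧ x < 14 := by
            rcases hr with h | h
            · exact absurd h hne
            · exact h
          rw [if_neg hne] at hc
          exact Or.inr ⟨by omega, by omega, by exact_mod_cast hc⟩
    · exact (List.nodup_dedup alist).filter _
    · refine (List.nodup_cons.mpr ⟨?_, PySem.List.nodup_pyRange_one 1 14⟩).filter _
      simp [PySem.List.mem_pyRange_one]
  have hlen := hperm.length_eq
  simp only [← List.countP_eq_length_filter] at hlen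
  rw [List.countP_cons] at hlen
  have hcongr :
      (PySem.List.pyRange 1 14 1).countP
        (fun i : Int => decide (i ∈ alist ∧ alist.count i = (if i = 0 then 2 else 4)))
      = (PySem.List.pyRange 1 14 1).countP
        (fun i : Int => decide (i ∈ alist ∧ alist.count i = 4)) := by
    apply List.countP_congr
    intro i hi
    have : i ≠ 0 := by
      have := (PySem.List.mem_pyRange_one).1 hi
      omega
    simp [this]
  rw [hcongr] at hlen
  rw [hlen]
  by_cases h0 : (0 : Int) ∈ alist ∧ alist.count 0 = 2
  · simp [h0]
    omega
  · simp [h0]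

-- distinctBombs is invariant under permutation
theorem distinctBombs_perm {l l' : List Int} (h : l.Perm l') :
    distinctBombs l = distinctBombs l' := by
  unfold distinctBombs
  have hp : (fun v : Int => decide (Qb l v)) = (fun v : Int => decide (Qb l' v)) := by
    funext v
    simp only [Qb, h.count_eq]
  rw [hp, h.dedup.countP_eq]

-- after dropping the leading run of x's from a ≤-sorted tail, everything is > x
theorem mem_dropWhile_gt (x : Int) (xs : List Int)
    (hle : ∀ z ∈ xs, x ≤ z) (hp : xs.Pairwise (· ≤ ·)) :
    ∀ z ∈ xs.dropWhile (fun y => y == x), x < z := by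
  induction xs with
  | nil => simp [List.dropWhile]
  | cons a as ih =>
    by_cases ha : a = x
    · subst ha
      simp only [List.dropWhile_cons, beq_self_eq_true, if_true]
      exact ih (fun z hz => hle z (List.mem_cons_of_mem _ hz)) hp.of_cons
    · have hax : (a == x) = false := by simp [ha]
      simp only [List.dropWhile_cons, hax, if_neg Bool.false_ne_true]
      intro z hz
      have hxa : x < a := lt_of_le_of_ne (hle a (List.mem_cons_self)) (Ne.symm ha)
      rcases List.mem_cons.mp hz with h | h
      · omega
      · have := (List.pairwise_cons.mp hp).1 z h
        omega

-- the run scan over a sorted list computes the distinct-value count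
theorem runs_eq (n : Nat) : ∀ (s : List Int), s.length ≤ n → s.Pairwise (· ≤ ·) →
    bombRuns s = distinctBombs s := by
  induction n with
  | zero =>
    intro s hlen _
    have : s = [] := List.length_eq_zero_iff.mp (Nat.le_zero.mp hlen)
    subst this
    simp [bombRuns, distinctBombs]
  | succ n ih =>
    intro s hlen hs
    match s with
    | [] => simp [bombRuns, distinctBombs]
    | x :: xs =>
      have hle : ∀ z ∈ xs, x ≤ z := (List.pairwise_cons.mp hs).1
      have hpxs : xs.Pairwise (· ≤ ·) := hs.of_cons
      set t := xs.takeWhile (fun y => y == x) with ht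
      set r := xs.dropWhile (fun y => y == x) with hr
      have hsplit : t ++ r = xs := List.takeWhile_append_dropWhile
      have htx : ∀ y ∈ t, y = x := by
        intro y hy
        exact eq_of_beq (List.mem_takeWhile_imp (p := fun y => y == x) (l := xs) hy)
      have hgt : ∀ z ∈ r, x < z := mem_dropWhile_gt x xs hle hpxs
      have hxnr : x ∉ r := fun h => absurd (hgt x h) (lt_irrefl x)
      have hrsub : r ⊆ xs := (List.dropWhile_sublist _).subset
      have hpr : r.Pairwise (· ≤ ·) := hpxs.sublist (List.dropWhile_sublist _)
      -- counts
      have hcx : (x :: xs).count x = t.length + 1 := by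
        have h1 : t.count x = t.length := List.count_eq_length.mpr (fun b hb => (htx b hb).symm)
        have h2 : r.count x = 0 := List.count_eq_zero.mpr hxnr
        rw [List.count_cons_self, ← hsplit, List.count_append, h1, h2]
      have hcv : ∀ v : Int, v ≠ x → (x :: xs).count v = r.count v := by
        intro v hv
        have h1 : t.count v = 0 := List.count_eq_zero.mpr (fun hvt => hv (htx v hvt))
        rw [List.count_cons_of_ne hv.symm, ← hsplit, List.count_append, h1, Nat.zero_add]
      -- dedup permutation
      have hdperm : (x :: xs).dedup.Perm (x :: r.dedup) := by
        rw [List.perm_ext_iff_of_nodup (List.nodup_dedup _)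
          (List.nodup_cons.mpr ⟨by simpa [List.mem_dedup] using hxnr, List.nodup_dedup r⟩)]
        intro v
        simp only [List.mem_dedup, List.mem_cons]
        constructor
        · rintro (hvx | hvxs)
          · exact Or.inl hvx
          · rw [← hsplit] at hvxs
            rcases List.mem_append.mp hvxs with h | h
            · exact Or.inl (htx v h)
            · exact Or.inr h
        · rintro (hvx | hvr)
          · exact Or.inl hvx
          · exact Or.inr (hrsub hvr)
      -- lengths for IH
      have hrlen : r.length ≤ n := by
        have h1 : r.length ≤ xs.length := List.length_dropWhile_le _ _
        simp only [List.length_cons] at hlen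
        omega
      have ihr : bombRuns r = distinctBombs r := ih r hrlen hpr
      -- unfold one step of bombRuns
      rw [show bombRuns (x :: xs)
            = (if (x = 0 ∧ (1 + (t.length : Int)) = 2)
                  ∨ (1 ≤ x ∧ x ≤ 13 ∧ (1 + (t.length : Int)) = 4)
               then 1 else 0) + bombRuns r from by rw [bombRuns]]
      rw [ihr]
      -- unfold distinctBombs on the left-hand side s
      unfold distinctBombs
      rw [hdperm.countP_eq, List.countP_cons]
      have hcongr :
          r.dedup.countP (fun v => decide (Qb (x :: xs) v))
            = r.dedup.countP (fun v => decide (Qb r v)) := by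
        apply List.countP_congr
        intro v hv
        have hvne : v ≠ x := by
          have := hgt v (List.mem_dedup.mp hv)
          omega
        simp only [decide_eq_true_eq, Qb, hcv v hvne]
      rw [hcongr]
      have hQx : ((x = 0 ∧ (1 + (t.length : Int)) = 2)
            ∨ (1 ≤ x ∧ x ≤ 13 ∧ (1 + (t.length : Int)) = 4)) ↔ Qb (x :: xs) x := by
        unfold Qb
        rw [hcx]
        push_cast
        constructor
        · rintro (⟨h0, hc⟩ | ⟨h1, h13, hc⟩)
          · exact Or.inl ⟨h0, by omega⟩
          · exact Or.inr ⟨h1, h13, by omega⟩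
        · rintro (⟨h0, hc⟩ | ⟨h1, h13, hc⟩)
          · exact Or.inl ⟨h0, by omega⟩
          · exact Or.inr ⟨h1, h13, by omega⟩
      by_cases hq : Qb (x :: xs) x
      · rw [if_pos (hQx.mpr hq)]
        simp only [hq, decide_true, if_pos]
        push_cast
        ring
      · rw [if_neg (fun h => hq (hQx.mp h))]
        simp only [hq, decide_false]
        push_cast
        ring

theorem count_bombs_eq_alt (alist : List Int) :
    count_bombs alist = count_bombs_alt alist := by
  unfold count_bombs_alt
  have hpair : (PySem.List.sorted alist (fun x => x) false).Pairwise (· ≤ ·) := by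
    simpa using PySem.List.sorted_pairwise (xs := alist) (key := fun x => x)
  rw [runs_eq (PySem.List.sorted alist (fun x => x) false).length _ le_rfl hpair]
  rw [distinctBombs_perm (PySem.List.sorted_perm (xs := alist) (key := fun x => x) (rev := false))]
  exact A_eq_distinctBombs alist

-- ===== VERDICT (by name: the statement is the Claim_ definition above) =====
theorem count_bombs_spec : Claim_equal_count_bombs := by
  intro alist _
  unfold Spec_count_bombs
  exact count_bombs_eq_alt alist
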